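-- pv_equiv track=rewrite | github.com/alissonfariias/Programacao1 | Unidade_6/caixa_alta/caixa_alta.py | caixa_alta
-- ===== SOURCE A (Python) =====
-- def meu_split(string):
-- 	lista = []
-- 	aux = ''
-- 	for c in string:
-- 		if c == ' ':
-- 			lista.append(aux)
-- 			aux = ''
-- 		else:
-- 			aux += c
-- 	lista.append(aux)
-- 	return lista
--
-- def meu_join(lista):
-- 	string = ''
-- 	for i in range(len(lista)):
-- 		if i != len(lista)-1:
-- 			string += lista[i] + ' '
-- 		else:
-- 			string += lista[i]
-- 	return string
--
-- def caixa_alta(string):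
-- 	lista = meu_split(string)
-- 	alt = []
-- 	for i in range(len(lista)):
-- 		if len(lista[i]) < 2:
-- 			alt.append(lista[i].lower())
-- 		else:
-- 			aux = lista[i][0].upper()
-- 			for k in range(1, len(lista[i])):
-- 				aux += lista[i][k]
-- 			alt.append(aux)
-- 	return meu_join(alt)
-- ===== SOURCE B (Python) =====
-- def caixa_alta(string):
--     out = []
--     start = True
--     n = len(string)
--     for i, c in enumerate(string):
--         if c == ' ':
--             out.append(' ')
--             start = True
--         elif start:
--             if i + 1 < n and string[i + 1] != ' ':
--                 out.append(c.upper())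
--             else:
--                 out.append(c.lower())
--             start = False
--         else:
--             out.append(c)
--     return ''.join(out)
-- ===== Notes on version B (the rewrite author's own statement) =====
-- stated objective: faster
-- what changed: Replaced A's split-into-word-list / per-word char-by-char rebuild / join-with-spaces pipeline by a single left-to-right pass with a word-start flag and one-character lookahead, building the output directly with no intermediate word list (avoids quadratic-ish repeated string concatenation per word).
import Mathlib
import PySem

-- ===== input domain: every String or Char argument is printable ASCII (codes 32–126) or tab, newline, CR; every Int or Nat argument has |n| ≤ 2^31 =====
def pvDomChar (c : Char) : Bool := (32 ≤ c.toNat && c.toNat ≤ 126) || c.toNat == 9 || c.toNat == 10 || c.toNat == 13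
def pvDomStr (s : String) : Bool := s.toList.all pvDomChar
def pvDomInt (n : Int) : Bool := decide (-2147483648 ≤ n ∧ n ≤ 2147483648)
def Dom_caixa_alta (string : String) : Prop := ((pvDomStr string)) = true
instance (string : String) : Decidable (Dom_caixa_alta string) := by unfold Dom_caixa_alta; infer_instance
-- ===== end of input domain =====

-- B replaces A's split/transform/join pipeline by one left-to-right pass with a
-- word-start flag and one-character lookahead, with no intermediate word list (measured faster in a timing run).

-- ===== PORT A =====
-- meu_split: foldl carries (lista, aux) exactly as the Python loop does
def pvMeuSplit (l : List Char) : List (List Char) :=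
  let p := l.foldl
    (fun (st : List (List Char) × List Char) c =>
      if c = ' ' then (st.1 ++ [st.2], []) else (st.1, st.2 ++ [c]))
    ([], [])
  p.1 ++ [p.2]

-- meu_join: loop over range(len(lista)) with the last-index test
def pvMeuJoin (lista : List (List Char)) : List Char :=
  (List.range lista.length).foldl
    (fun s i =>
      if i ≠ lista.length - 1 then s ++ lista.getD i [] ++ [' ']
      else s ++ lista.getD i [])
    []

-- the body of A's main loop for one word lista[i]
def pvProcWord (w : List Char) : List Char :=
  if w.length < 2 then PySem.Chars.lower w
  else
    (PySem.List.pyRange 1 (w.length : Int) 1).foldl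
      (fun aux k => aux ++ [PySem.List.pyGetD w k ' '])
      [PySem.Chars.upperChar (PySem.List.pyGetD w 0 ' ')]

def caixa_alta (string : String) : String :=
  let lista := pvMeuSplit string.toList
  let alt := (List.range lista.length).foldl
    (fun alt i => alt ++ [pvProcWord (lista.getD i [])]) []
  String.mk (pvMeuJoin alt)

-- ===== PORT B =====
-- B's single pass: `start` is the word-start flag, the head of `rest` is the
-- lookahead string[i+1]
def pvAltGo : Bool → List Char → List Char
  | _, [] => []
  | start, c :: rest =>
    if c = ' ' then ' ' :: pvAltGo true rest
    else if start then
      (match rest with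
       | [] => PySem.Chars.lowerChar c
       | d :: _ => if d = ' ' then PySem.Chars.lowerChar c
                   else PySem.Chars.upperChar c) :: pvAltGo false rest
    else c :: pvAltGo false rest

def caixa_alta_alt (string : String) : String :=
  String.mk (pvAltGo true string.toList)

-- ===== PRECONDITION & SPEC =====
def Spec_caixa_alta (string : String) (out : String) : Prop := out = caixa_alta_alt string
instance (string : String) (out : String) : Decidable (Spec_caixa_alta string out) := by unfold Spec_caixa_alta; infer_instance

-- ===== CLAIM (what is proved, stated in full; the proofs are below) =====
def Claim_equal_caixa_alta : Prop := ∀ (string : String), Dom_caixa_alta string → Spec_caixa_alta string (caixa_alta string)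

-- ===== LEMMAS AND PROOFS =====

/-- Recursive description of `meu_split`'s loop state. -/
def pvSplitAux (aux : List Char) : List Char → List (List Char)
  | [] => [aux]
  | c :: t => if c = ' ' then aux :: pvSplitAux [] t else pvSplitAux (aux ++ [c]) t

/-- Recursive description of `meu_join`. -/
def pvJoinR : List (List Char) → List Char
  | [] => []
  | [x] => x
  | x :: y :: xs => x ++ ' ' :: pvJoinR (y :: xs)

lemma pvMeuSplit_foldl (l : List Char) :
    ∀ (acc : List (List Char)) (aux : List Char),
      (l.foldl (fun (st : List (List Char) × List Char) c =>
        if c = ' ' then (st.1 ++ [st.2], []) else (st.1, st.2 ++ [c])) (acc, aux)).1 ++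
      [(l.foldl (fun (st : List (List Char) × List Char) c =>
        if c = ' ' then (st.1 ++ [st.2], []) else (st.1, st.2 ++ [c])) (acc, aux)).2] =
      acc ++ pvSplitAux aux l := by
  induction l with
  | nil => intro acc aux; simp [pvSplitAux]
  | cons c t ih =>
    intro acc aux
    by_cases hc : c = ' '
    · simp [List.foldl_cons, hc, pvSplitAux, ih]
    · simp [List.foldl_cons, hc, pvSplitAux, ih]

lemma pvMeuSplit_eq (l : List Char) : pvMeuSplit l = pvSplitAux [] l := by
  simpa [pvMeuSplit] using pvMeuSplit_foldl l [] []

lemma pvSplitAux_ne_nil (l : List Char) (aux : List Char) : pvSplitAux aux l ≠ [] := by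
  induction l generalizing aux with
  | nil => simp [pvSplitAux]
  | cons c t ih =>
    by_cases hc : c = ' ' <;> simp [pvSplitAux, hc, ih]

lemma pvSplitAux_no_space (l : List Char) (h : ∀ c ∈ l, c ≠ ' ') :
    ∀ aux, pvSplitAux aux l = [aux ++ l] := by
  induction l with
  | nil => intro aux; simp [pvSplitAux]
  | cons c t ih =>
    intro aux
    have hc : c ≠ ' ' := h c (by simp)
    have ht : ∀ x ∈ t, x ≠ ' ' := fun x hx => h x (by simp [hx])
    simp [pvSplitAux, hc, ih ht]

lemma pvSplitAux_word (w : List Char) (hw : ∀ c ∈ w, c ≠ ' ') (aux : List Char)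
    (t : List Char) : pvSplitAux aux (w ++ ' ' :: t) = (aux ++ w) :: pvSplitAux [] t := by
  induction w generalizing aux with
  | nil => simp [pvSplitAux]
  | cons c w2 ih =>
    have hc : c ≠ ' ' := hw c (by simp)
    have hw2 : ∀ x ∈ w2, x ≠ ' ' := fun x hx => hw x (by simp [hx])
    simp [pvSplitAux, hc, ih hw2]

lemma pvJoinR_cons (x : List Char) (xs : List (List Char)) (h : xs ≠ []) :
    pvJoinR (x :: xs) = x ++ ' ' :: pvJoinR xs := by
  cases xs with
  | nil => exact absurd rfl h
  | cons y ys => rfl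

/-- word-processing facts -/
lemma pvProcWord_nil : pvProcWord [] = [] := by decide

lemma pvProcWord_single (c : Char) : pvProcWord [c] = [PySem.Chars.lowerChar c] := by
  simp [pvProcWord, PySem.Chars.lower]

lemma pvFoldl_append_id (l : List Char) :
    ∀ init : List Char, l.foldl (fun aux c => aux ++ [c]) init = init ++ l := by
  induction l with
  | nil => intro init; simp
  | cons c t ih => intro init; simp [List.foldl_cons, ih]

lemma pvProcWord_long (c : Char) (w : List Char) (h : w ≠ []) :
    pvProcWord (c :: w) = PySem.Chars.upperChar c :: w := by
  have hlen : ¬ (c :: w).length < 2 := by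
    cases w with
    | nil => exact absurd rfl h
    | cons d w2 => simp
  unfold pvProcWord
  rw [if_neg hlen]
  have h0 : PySem.List.pyGetD (c :: w) 0 ' ' = c := by
    simp [PySem.List.pyGetD_zero_cons]
  rw [h0]
  have := PySem.List.foldl_pyRange_pyGetD' (xs := c :: w) (a := 1) (d := ' ')
    (f := fun (aux : List Char) x => aux ++ [x])
    (init := [PySem.Chars.upperChar c]) (by omega)
  rw [this]
  have hdrop : List.drop (Int.toNat 1) (c :: w) = w := rfl
  rw [hdrop, pvFoldl_append_id]
  rfl

/-- the main-loop fold over range(len(lista)) is `map pvProcWord` -/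
lemma pvAltLoop_take (l : List (List Char)) :
    ∀ (m : ℕ), m ≤ l.length → ∀ acc,
      (List.range m).foldl (fun alt i => alt ++ [pvProcWord (l.getD i [])]) acc =
        acc ++ (l.take m).map pvProcWord := by
  intro m
  induction m with
  | zero => intro _ acc; simp
  | succ m ih =>
    intro hm acc
    have hm' : m ≤ l.length := by omega
    have hlt : m < l.length := by omega
    rw [List.range_succ, List.foldl_append, ih hm']
    have h1 : l.getD m [] = l[m] := List.getD_eq_getElem l [] hlt
    have h2 : l.take (m + 1) = l.take m ++ [l[m]] := by
      rw [List.take_add_one, List.getElem?_eq_getElem hlt]; rfl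
    simp only [List.foldl_cons, List.foldl_nil]
    rw [h1, h2, List.map_append]
    simp

/-- meu_join on a snoc list -/
lemma pvMeuJoin_prefix (l : List (List Char)) (n : ℕ) (hn : l.length = n) :
    ∀ (m : ℕ), m + 1 ≤ n → ∀ acc,
      (List.range m).foldl (fun s i =>
        if i ≠ n - 1 then s ++ l.getD i [] ++ [' '] else s ++ l.getD i []) acc =
      acc ++ ((l.take m).map (· ++ [' '])).flatten := by
  intro m
  induction m with
  | zero => intro _ acc; simp
  | succ m ih =>
    intro hm acc
    have hm' : m + 1 ≤ n := by omega
    have hlt : m < l.length := by omega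
    have hne : m ≠ n - 1 := by omega
    rw [List.range_succ, List.foldl_append, ih hm']
    have h1 : l.getD m [] = l[m] := List.getD_eq_getElem l [] hlt
    have h2 : l.take (m + 1) = l.take m ++ [l[m]] := by
      rw [List.take_add_one, List.getElem?_eq_getElem hlt]; rfl
    rw [h2, List.map_append]
    simp only [List.foldl_cons, List.foldl_nil]
    rw [if_pos hne, h1]
    simp

lemma pvJoinR_snoc (xs : List (List Char)) (x : List Char) :
    pvJoinR (xs ++ [x]) = (xs.map (· ++ [' '])).flatten ++ x := by
  induction xs with
  | nil => simp [pvJoinR]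
  | cons y ys ih =>
    rw [List.cons_append, pvJoinR_cons _ _ (by simp)]
    simp [ih]

lemma pvMeuJoin_eq (l : List (List Char)) : pvMeuJoin l = pvJoinR l := by
  cases l with
  | nil => rfl
  | cons x xs =>
    have hlen : (x :: xs).length = xs.length + 1 := rfl
    unfold pvMeuJoin
    rw [hlen, List.range_succ, List.foldl_append,
      pvMeuJoin_prefix (x :: xs) (xs.length + 1) hlen xs.length le_rfl]
    simp only [List.foldl_cons, List.foldl_nil, if_neg (show ¬ xs.length ≠ xs.length + 1 - 1 by omega)]
    have hlt : xs.length < (x :: xs).length := by simp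
    have h1 : (x :: xs).take xs.length = (x :: xs).dropLast := by
      rw [List.dropLast_eq_take]; simp
    have h2 : (x :: xs).getD xs.length [] = (x :: xs).getLast (by simp) := by
      rw [List.getD_eq_getElem _ _ hlt, List.getLast_eq_getElem]; simp
    conv_rhs => rw [← List.dropLast_append_getLast (l := x :: xs) (by simp)]
    rw [pvJoinR_snoc, h1, h2]
    simp

/-- altGo copies a space-free block unchanged when not at a word start -/
lemma pvAltGo_false_copy (u : List Char) (hu : ∀ c ∈ u, c ≠ ' ') (r : List Char) :
    pvAltGo false (u ++ r) = u ++ pvAltGo false r := by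
  induction u with
  | nil => simp
  | cons c u2 ih =>
    have hc : c ≠ ' ' := hu c (by simp)
    have hu2 : ∀ x ∈ u2, x ≠ ' ' := fun x hx => hu x (by simp [hx])
    simp [pvAltGo, hc, ih hu2]

lemma pvAltGo_false_id (u : List Char) (hu : ∀ c ∈ u, c ≠ ' ') :
    pvAltGo false u = u := by
  have h := pvAltGo_false_copy u hu []
  simp only [List.append_nil] at h
  rw [h]
  simp [pvAltGo]

/-- every string is a space-free block, or a space-free word before a space -/
lemma pvDecomp (t : List Char) :
    (∀ c ∈ t, c ≠ ' ') ∨ ∃ w t2, t = w ++ ' ' :: t2 ∧ ∀ c ∈ w, c ≠ ' ' := by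
  induction t with
  | nil => exact Or.inl (by simp)
  | cons c t ih =>
    by_cases hc : c = ' '
    · exact Or.inr ⟨[], t, by simp [hc], by simp⟩
    · rcases ih with h | ⟨w, t2, ht, hw⟩
      · exact Or.inl (by
          intro x hx
          rcases List.mem_cons.mp hx with rfl | hx
          · exact hc
          · exact h x hx)
      · refine Or.inr ⟨c :: w, t2, by simp [ht], ?_⟩
        intro x hx
        rcases List.mem_cons.mp hx with rfl | hx
        · exact hc
        · exact hw x hx

/-- the heart of the equivalence: the single pass equals split-map-join -/
lemma pvMain : ∀ (n : ℕ) (l : List Char), l.length ≤ n →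
    pvAltGo true l = pvJoinR ((pvSplitAux [] l).map pvProcWord) := by
  intro n
  induction n with
  | zero =>
    intro l hl
    have : l = [] := List.length_eq_zero_iff.mp (Nat.le_zero.mp hl)
    subst this
    decide
  | succ n ih =>
    intro l hl
    cases l with
    | nil => decide
    | cons c t =>
      by_cases hc : c = ' '
      · subst hc
        have hne : (pvSplitAux [] t).map pvProcWord ≠ [] := by
          simp [pvSplitAux_ne_nil]
        have hsplit : pvSplitAux [] (' ' :: t) = [] :: pvSplitAux [] t := by
          simp [pvSplitAux]
        have ht : t.length ≤ n := by simp at hl; omega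
        rw [hsplit, List.map_cons, pvProcWord_nil, pvJoinR_cons _ _ hne]
        simp [pvAltGo, ih t ht]
      · rcases pvDecomp t with hfree | ⟨w, t2, rfl, hw⟩
        · -- no space anywhere: one word
          rw [show pvSplitAux [] (c :: t) = pvSplitAux [c] t by simp [pvSplitAux, hc],
            pvSplitAux_no_space t hfree [c]]
          cases t with
          | nil => simp [pvAltGo, hc, pvJoinR, pvProcWord_single]
          | cons d t2 =>
            have hd : d ≠ ' ' := hfree d (by simp)
            have hid : pvAltGo false (d :: t2) = d :: t2 := pvAltGo_false_id _ hfree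
            have hstep : pvAltGo true (c :: d :: t2) =
                PySem.Chars.upperChar c :: pvAltGo false (d :: t2) := by
              simp [pvAltGo, hc, hd]
            rw [hstep, hid]
            simp only [List.singleton_append, List.map_cons, List.map_nil]
            rw [pvProcWord_long c (d :: t2) (by simp)]
            rfl
        · -- first word w, then a space, then t2
          have ht2 : t2.length ≤ n := by
            simp [List.length_append] at hl; omega
          have hne : (pvSplitAux [] t2).map pvProcWord ≠ [] := by
            simp [pvSplitAux_ne_nil]
          rw [show pvSplitAux [] (c :: (w ++ ' ' :: t2)) = pvSplitAux [c] (w ++ ' ' :: t2) by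
              simp [pvSplitAux, hc],
            pvSplitAux_word w hw [c] t2]
          rw [List.map_cons, pvJoinR_cons _ _ hne, ← ih t2 ht2]
          simp only [List.singleton_append]
          cases w with
          | nil =>
            rw [pvProcWord_single]
            simp [pvAltGo, hc]
          | cons d w2 =>
            have hd : d ≠ ' ' := hw d (by simp)
            have hcopy : pvAltGo false ((d :: w2) ++ ' ' :: t2) =
                (d :: w2) ++ pvAltGo false (' ' :: t2) :=
              pvAltGo_false_copy (d :: w2) hw (' ' :: t2)
            rw [pvProcWord_long c (d :: w2) (by simp)]
            have hstep : pvAltGo true (c :: (d :: w2 ++ ' ' :: t2)) =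
                PySem.Chars.upperChar c :: pvAltGo false (d :: w2 ++ ' ' :: t2) := by
              simp [pvAltGo, hc, hd]
            rw [hstep, hcopy]
            simp [pvAltGo]

-- ===== VERDICT (by name: the statement is the Claim_ definition above) =====
theorem caixa_alta_spec : Claim_equal_caixa_alta := by
  intro s _
  unfold Spec_caixa_alta
  show String.mk (pvMeuJoin ((List.range (pvMeuSplit s.toList).length).foldl
      (fun alt i => alt ++ [pvProcWord ((pvMeuSplit s.toList).getD i [])]) [])) =
    caixa_alta_alt s
  unfold caixa_alta_alt
  rw [pvMeuSplit_eq,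
    pvAltLoop_take (pvSplitAux [] s.toList) (pvSplitAux [] s.toList).length le_rfl [],
    List.take_length, List.nil_append, pvMeuJoin_eq,
    pvMain s.toList.length s.toList le_rfl]
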